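-- pv_equiv track=rewrite | github.com/stan96D/ecommerce | ecommerce_website/classes/helpers/progress_view.py | get_order_progress_phases
-- ===== SOURCE A (Python) =====
-- def get_order_progress_phases(current_status=None):
--     # Define the phases
--     phases = [
--         {'name': 'Openstaand', 'status': 'open'},
--         {'name': 'Betaald', 'status': 'paid'},
--         {'name': 'Wachtende op bezorgservice', 'status': 'partly'},
--         {'name': 'Geleverd', 'status': 'delivered'}
--     ]
--
--     if current_status:
--         status_found = False  # Track if the current status is found
--
--         for i, phase in enumerate(phases):
--             if phase['status'] == current_status:
--                 if current_status == 'delivered':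
--                     # If it's 'delivered', mark it as completed
--                     phase['status'] = 'completed'
--                 elif current_status in ['open', 'failed'] and i == 0:
--                     # If it's the first phase and is 'open' or 'failed', make it current
--                     phase['status'] = 'current'
--                 else:
--                     # Mark this phase as the current phase
--                     phase['status'] = 'current'
--                 status_found = True
--             elif status_found:
--                 # Mark all subsequent phases as 'upcoming'
--                 phase['status'] = 'upcoming'
--             else:
--                 # Mark all previous phases as 'completed'
--                 phase['status'] = 'completed'
--     else:
--         # Default logic if `current_status` is not provided
--         for i, phase in enumerate(phases):
--             if i == 0:
--                 phase['status'] = 'current'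
--             else:
--                 phase['status'] = 'upcoming'
--
--     return phases
-- ===== SOURCE B (Python) =====
-- STATUS_ORDER = ['open', 'paid', 'partly', 'delivered']
-- PHASE_NAMES = ['Openstaand', 'Betaald', 'Wachtende op bezorgservice', 'Geleverd']
--
--
-- def get_order_progress_phases(current_status=None):
--     if not current_status:
--         statuses = ['current'] + ['upcoming'] * 3
--     else:
--         try:
--             idx = STATUS_ORDER.index(current_status)
--         except ValueError:
--             idx = None
--         if idx is None:
--             statuses = ['completed'] * 4
--         else:
--             at_match = 'completed' if current_status == 'delivered' else 'current'
--             statuses = ['completed' if j < idx else at_match if j == idx else 'upcoming'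
--                         for j in range(4)]
--     return [{'name': n, 'status': s} for n, s in zip(PHASE_NAMES, statuses)]
-- ===== Notes on version B (the rewrite author's own statement) =====
-- stated objective: simpler
-- what changed: Replaces A's flag-threaded in-place mutation loop (status_found carried across iterations, per-phase dict mutation) with an index-based positional fill: compute the position of current_status in the fixed status order once, then build the four statuses directly by comparing each position to it, and assemble the dicts from (name, status) pairs.
import Mathlib
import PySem

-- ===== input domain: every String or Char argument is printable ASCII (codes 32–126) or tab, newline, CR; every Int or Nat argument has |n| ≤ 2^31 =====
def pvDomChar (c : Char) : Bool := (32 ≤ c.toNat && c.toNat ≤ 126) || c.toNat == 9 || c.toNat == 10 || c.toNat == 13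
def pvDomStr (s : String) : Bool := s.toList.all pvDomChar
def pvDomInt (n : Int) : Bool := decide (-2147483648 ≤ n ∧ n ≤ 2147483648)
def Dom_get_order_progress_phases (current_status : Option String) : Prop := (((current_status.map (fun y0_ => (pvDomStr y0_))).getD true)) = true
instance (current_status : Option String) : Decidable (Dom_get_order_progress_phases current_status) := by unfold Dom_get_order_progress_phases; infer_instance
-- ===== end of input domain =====

-- ===== PORT A =====
-- B changes how the statuses are computed: an index-based positional fill instead of A's
-- flag-threaded mutation loop (objective: simpler).
-- dict assignment phase['status'] = v on a dict whose keys are "name","status": overwrite in place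
def pvSetStatus (phase : List (String × String)) (v : String) : List (String × String) :=
  phase.map (fun kv => if kv.1 = "status" then (kv.1, v) else kv)

-- phase['status'] lookup (the key is present in every phase literal)
def pvGetStatus (phase : List (String × String)) : String :=
  (((phase.find? (fun kv => kv.1 = "status")).map (fun kv => kv.2)).getD "")

def get_order_progress_phases (current_status : Option String) : List (List (String × String)) :=
  let phases : List (List (String × String)) :=
    [[("name", "Openstaand"), ("status", "open")],
     [("name", "Betaald"), ("status", "paid")],
     [("name", "Wachtende op bezorgservice"), ("status", "partly")],
     [("name", "Geleverd"), ("status", "delivered")]]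
  -- `if current_status:` — truthy iff Some nonempty string
  if (match current_status with | some cs => cs != "" | none => false) then
    let cs := current_status.getD ""
    (((PySem.List.enumerate phases).foldl
      (fun (st : Bool × List (List (String × String))) ip =>
        let i := ip.1
        let phase := ip.2
        if pvGetStatus phase = cs then
          if cs = "delivered" then (true, st.2 ++ [pvSetStatus phase "completed"])
          else if (cs = "open" ∨ cs = "failed") ∧ i = 0 then
            (true, st.2 ++ [pvSetStatus phase "current"])
          else (true, st.2 ++ [pvSetStatus phase "current"])
        else if st.1 then (st.1, st.2 ++ [pvSetStatus phase "upcoming"])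
        else (st.1, st.2 ++ [pvSetStatus phase "completed"]))
      (false, ([] : List (List (String × String))))).2)
  else
    (PySem.List.enumerate phases).map
      (fun ip => if ip.1 = 0 then pvSetStatus ip.2 "current" else pvSetStatus ip.2 "upcoming")

-- ===== PORT B =====
def pvStatusOrder : List String := ["open", "paid", "partly", "delivered"]
def pvPhaseNames : List String := ["Openstaand", "Betaald", "Wachtende op bezorgservice", "Geleverd"]

def get_order_progress_phases_alt (current_status : Option String) : List (List (String × String)) :=
  let statuses : List String :=
    if (match current_status with | some cs => cs != "" | none => false) = false then
      "current" :: List.replicate 3 "upcoming"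
    else
      let cs := current_status.getD ""
      match PySem.List.index? pvStatusOrder cs with
      | none => List.replicate 4 "completed"
      | some idx =>
        let atMatch := if cs = "delivered" then "completed" else "current"
        (PySem.List.pyRange 0 4 1).map
          (fun j => if j < (idx : Int) then "completed"
                    else if j = (idx : Int) then atMatch else "upcoming")
  (pvPhaseNames.zip statuses).map (fun ns => [("name", ns.1), ("status", ns.2)])

-- ===== PRECONDITION & SPEC =====
def Spec_get_order_progress_phases (current_status : Option String) (out : List (List (String × String))) : Prop := out = get_order_progress_phases_alt current_status
instance (current_status : Option String) (out : List (List (String × String))) : Decidable (Spec_get_order_progress_phases current_status out) := by unfold Spec_get_order_progress_phases; infer_instance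

-- ===== CLAIM (what is proved, stated in full; the proofs are below) =====
def Claim_equal_get_order_progress_phases : Prop := ∀ (current_status : Option String), Dom_get_order_progress_phases current_status → Spec_get_order_progress_phases current_status (get_order_progress_phases current_status)

-- ===== LEMMAS AND PROOFS =====

-- ===== VERDICT (by name: the statement is the Claim_ definition above) =====
theorem get_order_progress_phases_spec : Claim_equal_get_order_progress_phases := by
  intro cs _
  unfold Spec_get_order_progress_phases
  match cs with
  | none => decide
  | some s =>
    by_cases h0 : s = ""
    · subst h0; decide
    by_cases h1 : s = "open"
    · subst h1; decide
    by_cases h2 : s = "paid"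
    · subst h2; decide
    by_cases h3 : s = "partly"
    · subst h3; decide
    by_cases h4 : s = "delivered"
    · subst h4; decide
    have n1 : "open" ≠ s := Ne.symm h1
    have n2 : "paid" ≠ s := Ne.symm h2
    have n3 : "partly" ≠ s := Ne.symm h3
    have n4 : "delivered" ≠ s := Ne.symm h4
    simp [get_order_progress_phases, get_order_progress_phases_alt, pvGetStatus, pvSetStatus,
      pvStatusOrder, pvPhaseNames, PySem.List.enumerate, h0, h1, h2, h3, h4, n1, n2, n3, n4,
      PySem.List.index?_eq_idxOf?, List.idxOf?, List.findIdx?_cons, List.findIdx?_nil,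
      List.zip, List.replicate]
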